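-- pv_equiv track=rewrite | github.com/danigutsch/agent-customizations | scripts/check_plugin_version_bumps.py | strip_unreleased_section
-- ===== SOURCE A (Python) =====
-- UNRELEASED_HEADINGS = {"## Unreleased", "## [Unreleased]"}
--
-- def strip_unreleased_section(changelog_text: str) -> str:
--     lines = changelog_text.splitlines()
--     stripped_lines: list[str] = []
--     index = 0
--
--     while index < len(lines):
--         line = lines[index]
--         if line in UNRELEASED_HEADINGS:
--             index += 1
--             while index < len(lines) and not lines[index].startswith("## "):
--                 index += 1
--             continue
--         stripped_lines.append(line)
--         index += 1
--
--     return "\n".join(stripped_lines).strip()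
-- ===== SOURCE B (Python) =====
-- UNRELEASED_HEADINGS = {"## Unreleased", "## [Unreleased]"}
--
-- def strip_unreleased_section(changelog_text: str) -> str:
--     lines = changelog_text.splitlines()
--     blocks: list[list[str]] = []
--     current: list[str] = []
--     for line in lines:
--         if line.startswith("## "):
--             blocks.append(current)
--             current = [line]
--         else:
--             current.append(line)
--     blocks.append(current)
--     kept = [b for b in blocks if not (b and b[0] in UNRELEASED_HEADINGS)]
--     return "\n".join(line for b in kept for line in b).strip()
-- ===== Notes on version B (the rewrite author's own statement) =====
-- stated objective: alternative
-- what changed: Replaces A's index-based skip-state machine (inner while loop swallowing lines after an Unreleased heading) by a build-then-filter decomposition: split lines into heading-delimited blocks, filter out Unreleased blocks, flatten.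
import Mathlib
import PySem

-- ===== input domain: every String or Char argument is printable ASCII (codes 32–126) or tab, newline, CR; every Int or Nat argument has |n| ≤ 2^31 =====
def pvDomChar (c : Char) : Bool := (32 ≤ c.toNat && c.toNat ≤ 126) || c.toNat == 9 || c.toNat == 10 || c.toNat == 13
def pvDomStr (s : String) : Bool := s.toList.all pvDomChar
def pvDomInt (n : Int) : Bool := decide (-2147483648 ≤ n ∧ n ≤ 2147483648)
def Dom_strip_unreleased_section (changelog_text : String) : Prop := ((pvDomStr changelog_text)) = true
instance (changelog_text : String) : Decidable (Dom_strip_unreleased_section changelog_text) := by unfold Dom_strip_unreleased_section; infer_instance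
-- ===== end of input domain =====

-- B replaces A's interleaved skip-state-machine by split-into-blocks, filter blocks, flatten (objective: simpler decomposition, same cost).

-- shared module-level tests: line ∈ UNRELEASED_HEADINGS, line.startswith("## ")
def pvUnreleased (l : String) : Bool := l == "## Unreleased" || l == "## [Unreleased]"
def pvStarts (l : String) : Bool := PySem.Str.startswith l "## "

-- ===== PORT A =====
def stripLoop : List String → List String
  | [] => []
  | l :: rest =>
    if pvUnreleased l then
      -- inner while: advance index past lines not starting with "## "
      stripLoop (rest.dropWhile (fun s => !pvStarts s))
    else
      l :: stripLoop rest
termination_by ls => ls.length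
decreasing_by
  · simp only [List.length_cons]; exact Nat.lt_succ_of_le (List.length_dropWhile_le _ _)
  · simp

def strip_unreleased_section (changelog_text : String) : String :=
  PySem.Str.strip (PySem.Str.join "\n" (stripLoop (PySem.Str.splitlines changelog_text)))

-- ===== PORT B =====
def pvKeepBlock (b : List String) : Bool :=
  match b with
  | [] => true
  | h :: _ => !pvUnreleased h

def pvBStep (st : List (List String) × List String) (l : String) :
    List (List String) × List String :=
  if pvStarts l then (st.1 ++ [st.2], [l]) else (st.1, st.2 ++ [l])

def strip_unreleased_section_alt (changelog_text : String) : String :=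
  let lines := PySem.Str.splitlines changelog_text
  let st := lines.foldl pvBStep ([], [])
  let blocks := st.1 ++ [st.2]
  let kept := blocks.filter pvKeepBlock
  PySem.Str.strip (PySem.Str.join "\n" (kept.flatMap (fun b => b)))

-- ===== PRECONDITION & SPEC =====
def Spec_strip_unreleased_section (changelog_text : String) (out : String) : Prop := out = strip_unreleased_section_alt changelog_text
instance (changelog_text : String) (out : String) : Decidable (Spec_strip_unreleased_section changelog_text out) := by unfold Spec_strip_unreleased_section; infer_instance

-- ===== CLAIM (what is proved, stated in full; the proofs are below) =====
def Claim_equal_strip_unreleased_section : Prop := ∀ (changelog_text : String), Dom_strip_unreleased_section changelog_text → Spec_strip_unreleased_section changelog_text (strip_unreleased_section changelog_text)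

-- ===== LEMMAS AND PROOFS =====

-- recursive characterisation of B's block-splitting fold
def pvSplitGo : List String → List String → List (List String)
  | cur, [] => [cur]
  | cur, l :: rest =>
    if pvStarts l then cur :: pvSplitGo [l] rest
    else pvSplitGo (cur ++ [l]) rest

theorem pvFold_eq (lines : List String) : ∀ (bs : List (List String)) (cur : List String),
    (lines.foldl pvBStep (bs, cur)).1 ++ [(lines.foldl pvBStep (bs, cur)).2] =
      bs ++ pvSplitGo cur lines := by
  induction lines with
  | nil => intro bs cur; simp [pvSplitGo]
  | cons l rest ih =>
      intro bs cur
      simp only [List.foldl_cons, pvBStep, pvSplitGo]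
      by_cases h : pvStarts l = true
      · simp only [if_pos h, ih]; simp
      · simp only [if_neg h, ih]

theorem pvUnrel_starts {l : String} (h : pvUnreleased l = true) : pvStarts l = true := by
  unfold pvUnreleased at h
  rcases Bool.or_eq_true_iff.mp h with h' | h' <;>
    · rw [show l = _ from eq_of_beq h']; decide

theorem pvKeep_append {cur : List String} (l : String) (h : cur ≠ []) :
    pvKeepBlock (cur ++ [l]) = pvKeepBlock cur := by
  cases cur with
  | nil => exact absurd rfl h
  | cons a t => simp [pvKeepBlock]

theorem pvMain (lines : List String) :
    (∀ cur, pvKeepBlock cur = true →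
      ((pvSplitGo cur lines).filter pvKeepBlock).flatMap (fun b => b) = cur ++ stripLoop lines) ∧
    (∀ cur, pvKeepBlock cur = false →
      ((pvSplitGo cur lines).filter pvKeepBlock).flatMap (fun b => b) =
        stripLoop (lines.dropWhile (fun s => !pvStarts s))) := by
  induction lines with
  | nil =>
      constructor
      · intro cur h; simp [pvSplitGo, stripLoop, h]
      · intro cur h; simp [pvSplitGo, stripLoop, h]
  | cons l rest ih =>
      obtain ⟨ih1, ih2⟩ := ih
      constructor
      · intro cur hcur
        by_cases hsw : pvStarts l = true
        · rw [pvSplitGo, if_pos hsw, List.filter_cons_of_pos hcur, List.flatMap_cons]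
          by_cases hun : pvUnreleased l = true
          · rw [ih2 [l] (by simp [pvKeepBlock, hun]), stripLoop, if_pos hun]
          · rw [ih1 [l] (by simp [pvKeepBlock, hun]), stripLoop, if_neg hun]
            simp
        · have hun : pvUnreleased l = false := by
            cases h' : pvUnreleased l with
            | false => rfl
            | true => exact absurd (pvUnrel_starts h') hsw
          have hk : pvKeepBlock (cur ++ [l]) = true := by
            cases cur with
            | nil => simp [pvKeepBlock, hun]
            | cons a t => rw [pvKeep_append l (by simp)]; exact hcur
          rw [pvSplitGo, if_neg hsw, ih1 (cur ++ [l]) hk, stripLoop,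
            if_neg (by simp [hun])]
          simp
      · intro cur hcur
        have hcne : cur ≠ [] := by
          intro h; rw [h] at hcur; simp [pvKeepBlock] at hcur
        by_cases hsw : pvStarts l = true
        · rw [List.dropWhile_cons_of_neg (by simp [hsw]),
            pvSplitGo, if_pos hsw, List.filter_cons_of_neg (by simp [hcur]), stripLoop]
          by_cases hun : pvUnreleased l = true
          · rw [if_pos hun, ih2 [l] (by simp [pvKeepBlock, hun])]
          · rw [if_neg hun, ih1 [l] (by simp [pvKeepBlock, hun])]
            simp
        · rw [List.dropWhile_cons_of_pos (by simp [hsw]), pvSplitGo, if_neg hsw,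
            ih2 (cur ++ [l]) (by rw [pvKeep_append l hcne]; exact hcur)]

-- ===== VERDICT (by name: the statement is the Claim_ definition above) =====
theorem strip_unreleased_section_spec : Claim_equal_strip_unreleased_section := by
  intro changelog_text _
  unfold Spec_strip_unreleased_section
  simp only [strip_unreleased_section, strip_unreleased_section_alt]
  rw [pvFold_eq, List.nil_append,
    (pvMain (PySem.Str.splitlines changelog_text)).1 [] (by simp [pvKeepBlock]),
    List.nil_append]
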